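-- pv_equiv track=rewrite | github.com/Benevolens1/modified_sudoku | modified_sudoku.py | verify_line
-- ===== SOURCE A (Python) =====
-- def verify_line(matrix:list, x:int)->bool:
--     """check if the x line of matrix follows correctly the rules ;
--     0 is considered as a jocker."""
--
--     present_symbols = []
--
--     for i in range(4):
--         symbol = matrix[x][i]
--         if symbol == 0:
--             continue
--         if symbol not in present_symbols:
--             present_symbols.append(symbol)
--         else:
--             return False
--
--     return True
-- ===== SOURCE B (Python) =====
-- def verify_line(matrix, x):
--     """check if the x line of matrix follows correctly the rules ;
--     0 is considered as a jocker."""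
--     cells = [matrix[x][i] for i in range(4)]
--     for i in range(4):
--         for j in range(i + 1, 4):
--             if cells[i] != 0 and cells[i] == cells[j]:
--                 return False
--     return True
-- ===== Notes on version B (the rewrite author's own statement) =====
-- stated objective: alternative
-- what changed: Replaces A's single-pass seen-accumulator loop with early return by a staged brute-force all-pairs comparison: first collect the four cells, then compare every pair (i,j), i<j, flagging a duplicate nonzero value; no membership container is maintained.
-- outside the precondition, e.g. on verify_line([[1, 1]], 0): A returns False, B raises IndexError
import Mathlib
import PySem

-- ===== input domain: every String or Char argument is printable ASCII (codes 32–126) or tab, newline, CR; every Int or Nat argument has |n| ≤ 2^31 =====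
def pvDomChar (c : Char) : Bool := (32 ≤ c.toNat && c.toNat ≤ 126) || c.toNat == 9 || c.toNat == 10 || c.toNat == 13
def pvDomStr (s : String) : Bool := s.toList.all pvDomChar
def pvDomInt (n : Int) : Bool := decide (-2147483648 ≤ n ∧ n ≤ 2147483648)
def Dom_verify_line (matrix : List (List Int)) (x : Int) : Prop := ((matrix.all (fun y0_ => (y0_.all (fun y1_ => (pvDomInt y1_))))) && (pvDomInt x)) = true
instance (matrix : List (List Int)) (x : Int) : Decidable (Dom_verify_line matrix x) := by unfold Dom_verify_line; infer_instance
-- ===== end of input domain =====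

-- ===== PORT A =====
-- B replaces A's single-pass seen-accumulator loop by a staged all-pairs comparison
-- of the four collected cells (objective: alternative; same constant cost).
-- A-side helper: the for-loop over the column indices with the present_symbols accumulator
def vlLoop (row : List Int) : List Int → List Int → Bool
  | [], _ => true
  | i :: rest, present =>
      let symbol := PySem.List.pyGetD row i 0
      if symbol = 0 then vlLoop row rest present
      else if symbol ∈ present then false
      else vlLoop row rest (present ++ [symbol])

def verify_line (matrix : List (List Int)) (x : Int) : Bool :=
  vlLoop ((PySem.List.pyGet? matrix x).getD []) (PySem.List.pyRange 0 4 1) []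

-- ===== PORT B =====
-- inner loop over j in range(i+1, 4)
def vlPairInner (cells : List Int) (i : Int) : List Int → Bool
  | [] => true
  | j :: rest =>
      if PySem.List.pyGetD cells i 0 ≠ 0 ∧ PySem.List.pyGetD cells i 0 = PySem.List.pyGetD cells j 0
      then false
      else vlPairInner cells i rest

-- outer loop over i in range(4); 'return False' inside the inner loop exits both loops
def vlPairOuter (cells : List Int) : List Int → Bool
  | [] => true
  | i :: rest =>
      if vlPairInner cells i (PySem.List.pyRange (i + 1) 4 1)
      then vlPairOuter cells rest
      else false

def verify_line_alt (matrix : List (List Int)) (x : Int) : Bool :=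
  let cells := (PySem.List.pyRange 0 4 1).map
    (fun i => PySem.List.pyGetD ((PySem.List.pyGet? matrix x).getD []) i 0)
  vlPairOuter cells (PySem.List.pyRange 0 4 1)

-- ===== PRECONDITION & SPEC =====
-- Pre_ excludes inputs where matrix[x] raises IndexError or the row has fewer than 4 cells:
-- there A raises IndexError unless a duplicate is met before the missing index (then it returns
-- False), and B's comprehension over range(4) itself raises IndexError on every such short row.
def Pre_verify_line (matrix : List (List Int)) (x : Int) : Prop :=
  4 ≤ ((PySem.List.pyGet? matrix x).getD []).length
instance (matrix : List (List Int)) (x : Int) : Decidable (Pre_verify_line matrix x) := by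
  unfold Pre_verify_line; infer_instance
def pvWitness_verify_line : List (List Int) × Int := ([[1, 2, 0, 3]], 0)
def Spec_verify_line (matrix : List (List Int)) (x : Int) (out : Bool) : Prop := out = verify_line_alt matrix x
instance (matrix : List (List Int)) (x : Int) (out : Bool) : Decidable (Spec_verify_line matrix x out) := by unfold Spec_verify_line; infer_instance

-- ===== CLAIM (what is proved, stated in full; the proofs are below) =====
def Claim_equal_verify_line : Prop := ∀ (matrix : List (List Int)) (x : Int), Dom_verify_line matrix x → Pre_verify_line matrix x → Spec_verify_line matrix x (verify_line matrix x)

-- ===== LEMMAS AND PROOFS =====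

set_option maxHeartbeats 2000000 in
theorem key (a b c d : Int) (r : List Int) :
    vlLoop (a::b::c::d::r) (PySem.List.pyRange 0 4 1) [] =
      vlPairOuter ((PySem.List.pyRange 0 4 1).map
        (fun i => PySem.List.pyGetD (a::b::c::d::r) i 0)) (PySem.List.pyRange 0 4 1) := by
  have hr : PySem.List.pyRange 0 4 1 = [0, 1, 2, 3] := by decide
  have hr1 : PySem.List.pyRange 1 4 1 = [1, 2, 3] := by decide
  have hr2 : PySem.List.pyRange 2 4 1 = [2, 3] := by decide
  have hr3 : PySem.List.pyRange 3 4 1 = [3] := by decide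
  rw [hr]
  simp only [vlLoop, vlPairOuter, List.map, PySem.List.pyGetD_ofNat',
    List.getD, List.getElem?_cons_zero, List.getElem?_cons_succ, Option.getD_some]
  norm_num [vlLoop, vlPairOuter, vlPairInner]
  by_cases ha : a = 0 <;> by_cases hb : b = 0 <;> by_cases hc : c = 0 <;> by_cases hd : d = 0 <;>
    by_cases h1 : b = a <;> by_cases h2 : c = a <;> by_cases h3 : c = b <;>
    by_cases h4 : d = a <;> by_cases h5 : d = b <;> by_cases h6 : d = c <;>
    simp_all [vlPairInner, hr1, hr2, hr3, PySem.List.pyGetD_ofNat', List.getD] <;> omega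

-- ===== VERDICT (by name: the statement is the Claim_ definition above) =====
theorem verify_line_spec : Claim_equal_verify_line := by
  intro matrix x _ hpre
  unfold Pre_verify_line at hpre
  unfold Spec_verify_line
  cases h : PySem.List.pyGet? matrix x with
  | none => rw [h] at hpre; simp at hpre
  | some row =>
    rw [h] at hpre
    simp only [Option.getD_some] at hpre
    match row, hpre with
    | a :: b :: c :: d :: r, _ =>
      unfold verify_line verify_line_alt
      rw [h]
      simp only [Option.getD_some]
      exact key a b c d r
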